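-- pv_equiv track=rewrite | github.com/JinxYTW/DM-de-mort | DM.py | sous_tab
-- ===== SOURCE A (Python) =====
-- def sous_tab(p:list):
--     l=[]
--     for i in range(len(p)):
--         l.append(p[i])
--         for k in range(len(l)-1):
--             if len(l) > 1:
--                 l.append(p[i]+l[k])
--     l.insert(0,0)
--     return ((l))
-- ===== SOURCE B (Python) =====
-- def sous_tab(p: list):
--     n = len(p)
--     return [sum(p[i] for i in range(n) if (j >> i) & 1) for j in range(1 << n)]
-- ===== Notes on version B (the rewrite author's own statement) =====
-- stated objective: alternative
-- what changed: Replaces the append-while-growing nested loops with a closed-form bitmask enumeration: the j-th output is the sum of p[i] over the set bits of j, for j in range(2**len(p)).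
import Mathlib
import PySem

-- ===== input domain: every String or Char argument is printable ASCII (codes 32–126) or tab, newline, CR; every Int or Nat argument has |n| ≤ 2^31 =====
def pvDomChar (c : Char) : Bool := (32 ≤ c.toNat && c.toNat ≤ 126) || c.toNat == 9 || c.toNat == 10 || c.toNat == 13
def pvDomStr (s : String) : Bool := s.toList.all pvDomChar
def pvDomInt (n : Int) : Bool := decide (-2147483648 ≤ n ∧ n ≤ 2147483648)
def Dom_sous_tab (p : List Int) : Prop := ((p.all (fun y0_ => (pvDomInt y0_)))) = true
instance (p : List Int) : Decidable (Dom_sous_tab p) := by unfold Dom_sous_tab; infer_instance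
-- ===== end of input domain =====

-- B replaces A's append-while-growing nested loops with a direct bitmask enumeration:
-- output[j] = sum of p[i] over the set bits of j, for j in range(2**len(p)) (objective: alternative).

-- ===== PORT A =====
-- one outer iteration of A: append p[i], then the inner indexed loop over range(len(l)-1)
def sousTabStep (l : List Int) (x : Int) : List Int :=
  (PySem.List.pyRange 0 (((l ++ [x]).length : Int) - 1) 1).foldl
    (fun l2 k => if l2.length > 1 then l2 ++ [x + PySem.List.pyGetD l2 k 0] else l2) (l ++ [x])

def sous_tab (p : List Int) : List Int :=
  0 :: (PySem.List.pyRange 0 (p.length : Int) 1).foldl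
    (fun l i => sousTabStep l (PySem.List.pyGetD p i 0)) []

-- ===== PORT B =====
-- Source B: [sum(p[i] for i in range(n) if (j >> i) & 1) for j in range(1 << n)];
-- j ranges over nonnegative ints, so '(j >> i) & 1' is exactly Nat.testBit j i.
def sous_tab_alt (p : List Int) : List Int :=
  (List.range (2 ^ p.length)).map (fun j =>
    ((List.range p.length).filter (fun i => j.testBit i)).foldl (fun s i => s + p.getD i 0) 0)

-- ===== PRECONDITION & SPEC =====
def Spec_sous_tab (p : List Int) (out : List Int) : Prop := out = sous_tab_alt p
instance (p : List Int) (out : List Int) : Decidable (Spec_sous_tab p out) := by unfold Spec_sous_tab; infer_instance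

-- ===== CLAIM (what is proved, stated in full; the proofs are below) =====
def Claim_equal_sous_tab : Prop := ∀ (p : List Int), Dom_sous_tab p → Spec_sous_tab p (sous_tab p)

-- ===== LEMMAS AND PROOFS =====

-- the doubling recurrence underlying A's outer loop
def sousFold (p : List Int) : List Int :=
  p.foldl (fun l x => l ++ [x] ++ l.map (fun y => x + y)) []

-- j-th subset sum of p (the body of B's comprehension)
def ssum (p : List Int) (j : Nat) : Int :=
  ((List.range p.length).filter (fun i => j.testBit i)).foldl (fun s i => s + p.getD i 0) 0

-- A's inner loop over range(n) appends x + L[k] for k = 0..n-1, reading only pre-existing cells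
theorem sousTab_inner (x : Int) : ∀ (n : Nat) (L : List Int), n ≤ L.length → (2 ≤ L.length ∨ n = 0) →
    (PySem.List.pyRange 0 (n : Int) 1).foldl
      (fun l2 k => if l2.length > 1 then l2 ++ [x + PySem.List.pyGetD l2 k 0] else l2) L
    = L ++ (L.take n).map (fun y => x + y) := by
  intro n
  induction n with
  | zero => intro L _ _; simp
  | succ n ih =>
    intro L hn hc
    have h2 : 2 ≤ L.length := by
      rcases hc with h | h
      · exact h
      · omega
    have hcast : ((n + 1 : Nat) : Int) = (n : Int) + 1 := by push_cast; ring
    rw [hcast, PySem.List.pyRange_one_succ_right (by positivity), List.foldl_append,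
        ih L (by omega) (Or.inl h2)]
    have hlen : (L ++ (L.take n).map (fun y => x + y)).length > 1 := by
      simp; omega
    have hnL : n < L.length := by omega
    have hget : PySem.List.pyGetD (L ++ (L.take n).map (fun y => x + y)) (n : Int) 0 = L[n] := by
      rw [PySem.List.pyGetD_natCast]
      simp [List.getD_eq_getElem?_getD, List.getElem?_append_left hnL,
            List.getElem?_eq_getElem hnL]
    simp only [List.foldl_cons, List.foldl_nil, if_pos hlen, hget]
    rw [List.take_add_one, List.getElem?_eq_getElem hnL]
    simp
    rw [List.take_add_one, List.getElem?_map, List.getElem?_eq_getElem hnL]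
    simp

-- one outer step of A equals one step of the doubling recurrence
theorem sousTabStep_eq (l : List Int) (x : Int) :
    sousTabStep l x = l ++ [x] ++ l.map (fun y => x + y) := by
  have hle : l.length ≤ (l ++ [x]).length := by simp
  have hor : 2 ≤ (l ++ [x]).length ∨ l.length = 0 := by
    cases l with
    | nil => exact Or.inr rfl
    | cons a t => left; simp
  unfold sousTabStep
  have hb : ((l ++ [x]).length : Int) - 1 = ((l.length : Nat) : Int) := by simp
  rw [hb, sousTab_inner x l.length (l ++ [x]) hle hor]
  simp [List.take_left']

-- A is the doubling recurrence (with the leading 0)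
theorem sousTab_eq_fold (p : List Int) : sous_tab p = 0 :: sousFold p := by
  unfold sous_tab sousFold
  rw [PySem.List.foldl_pyRange_zero_pyGetD' p 0 sousTabStep []]
  have : sousTabStep = fun l x => l ++ [x] ++ l.map (fun y => x + y) := by
    funext l x; exact sousTabStep_eq l x
  rw [this]

-- ssum over p ++ [x], split on bit n
theorem ssum_append_low (p : List Int) (x : Int) (j : Nat) (hj : j < 2 ^ p.length) :
    ssum (p ++ [x]) j = ssum p j := by
  unfold ssum
  have hbit : j.testBit p.length = false :=
    Nat.testBit_lt_two_pow hj
  rw [List.length_append, List.length_singleton, List.range_succ, List.filter_append]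
  simp [hbit]
  apply PySem.List.foldl_congr_mem
  intro s i hi
  have hi' : i < p.length := (List.mem_filter.mp hi).1 |> List.mem_range.mp
  simp [List.getElem?_append_left hi']

theorem ssum_append_high (p : List Int) (x : Int) (j : Nat) (hj : j < 2 ^ p.length) :
    ssum (p ++ [x]) (2 ^ p.length + j) = ssum p j + x := by
  unfold ssum
  have hbit : (2 ^ p.length + j).testBit p.length = true := by
    rw [Nat.testBit_two_pow_add_eq]
    simp [Nat.testBit_lt_two_pow hj]
  rw [List.length_append, List.length_singleton, List.range_succ, List.filter_append]
  have hfil : (List.range p.length).filter (fun i => (2 ^ p.length + j).testBit i)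
      = (List.range p.length).filter (fun i => j.testBit i) := by
    apply List.filter_congr
    intro i hi
    rw [Nat.testBit_two_pow_add_gt (List.mem_range.mp hi)]
  rw [hfil]
  simp only [hbit, List.filter_cons, List.filter_nil, if_pos, List.foldl_append,
    List.foldl_cons, List.foldl_nil]
  have hgetn : (p ++ [x]).getD p.length 0 = x := by
    simp [List.getD_eq_getElem?_getD]
  rw [hgetn]
  congr 1
  apply PySem.List.foldl_congr_mem
  intro s i hi
  have hi' : i < p.length := (List.mem_filter.mp hi).1 |> List.mem_range.mp
  simp [List.getElem?_append_left hi']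

-- B equals the doubling recurrence (with the leading 0)
theorem sousAlt_eq_fold (p : List Int) : sous_tab_alt p = 0 :: sousFold p := by
  have key : ∀ q : List Int, (List.range (2 ^ q.length)).map (ssum q) = 0 :: sousFold q := by
    intro q
    induction q using List.reverseRecOn with
    | nil => simp [ssum, sousFold]
    | append_singleton p x ih =>
      have hlen : (p ++ [x]).length = p.length + 1 := by simp
      have hsucc : 2 ^ (p.length + 1) = 2 ^ p.length + 2 ^ p.length := by ring
      rw [hlen, hsucc, List.range_add, List.map_append, List.map_map]
      have h1 : (List.range (2 ^ p.length)).map (ssum (p ++ [x]))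
          = (List.range (2 ^ p.length)).map (ssum p) := by
        apply List.map_congr_left
        intro j hj
        exact ssum_append_low p x j (List.mem_range.mp hj)
      have h2 : (List.range (2 ^ p.length)).map (ssum (p ++ [x]) ∘ fun j => 2 ^ p.length + j)
          = (List.range (2 ^ p.length)).map (fun j => ssum p j + x) := by
        apply List.map_congr_left
        intro j hj
        exact ssum_append_high p x j (List.mem_range.mp hj)
      have h3 : (List.range (2 ^ p.length)).map (fun j => ssum p j + x)
          = ((List.range (2 ^ p.length)).map (ssum p)).map (fun y => y + x) := by
        rw [List.map_map]; rfl
      rw [h1, h2, h3, ih]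
      have hstep : sousFold (p ++ [x]) = sousFold p ++ [x] ++ (sousFold p).map (fun y => x + y) := by
        unfold sousFold
        rw [List.foldl_append]
        rfl
      have h4 : List.map (fun y => y + x) (sousFold p) = List.map (fun y => x + y) (sousFold p) := by
        apply List.map_congr_left
        intro y _
        exact add_comm y x
      rw [hstep]
      simp only [List.map_cons, zero_add, h4, List.cons_append, List.nil_append,
        List.append_assoc]
  have : sous_tab_alt p = (List.range (2 ^ p.length)).map (ssum p) := rfl
  rw [this, key]

-- ===== VERDICT (by name: the statement is the Claim_ definition above) =====
theorem sous_tab_spec : Claim_equal_sous_tab := by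
  intro p _
  unfold Spec_sous_tab
  rw [sousTab_eq_fold, sousAlt_eq_fold]
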